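-- pv_equiv track=rewrite | github.com/wonderfulboyx/competitive-python | abc085/c/main.py | solve
-- ===== SOURCE A (Python) =====
-- from typing import Tuple
--
-- def solve(num: int, amount: int) -> Tuple[int, int, int]:
--     for count_10000 in range(0, num + 1):
--         for count_5000 in range(0, num - count_10000 + 1):
--             count_1000 = num - (count_10000 + count_5000)
--             total = count_10000 * 10000 \
--                         + count_5000 * 5000 \
--                         + count_1000 * 1000
--             if total == amount:
--                 return count_10000, count_5000, count_1000
--     return -1, -1, -1
-- ===== SOURCE B (Python) =====
-- def solve(num, amount):
--     # single loop over count_10000; count_5000 from the linear equation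
--     for a in range(0, num + 1):
--         rem = amount - 1000 * num - 9000 * a
--         q, r = divmod(rem, 4000)
--         if r == 0 and 0 <= q <= num - a:
--             return a, q, num - a - q
--     return -1, -1, -1
-- ===== Notes on version B (the rewrite author's own statement) =====
-- stated objective: faster
-- what changed: B replaces the inner scan over count_5000 by solving the linear equation 9000*a + 4000*b = amount - 1000*num directly with divmod, turning the nested O(n^2) loops into one O(n) loop.
import Mathlib
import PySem

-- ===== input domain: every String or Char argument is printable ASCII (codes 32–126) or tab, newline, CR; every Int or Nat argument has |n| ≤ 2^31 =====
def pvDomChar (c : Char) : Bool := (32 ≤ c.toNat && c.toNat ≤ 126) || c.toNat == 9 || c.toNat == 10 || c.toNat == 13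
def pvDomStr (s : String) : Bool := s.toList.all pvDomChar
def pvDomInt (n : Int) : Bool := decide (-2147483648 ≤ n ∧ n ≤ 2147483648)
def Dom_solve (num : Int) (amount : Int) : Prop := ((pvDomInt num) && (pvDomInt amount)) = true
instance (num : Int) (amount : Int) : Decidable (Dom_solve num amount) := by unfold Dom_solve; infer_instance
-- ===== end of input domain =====

-- B replaces A's inner scan over count_5000 by solving the linear equation with divmod: O(n^2) → O(n).

-- ===== PORT A =====
-- inner 'for count_5000 in range(...)' loop with early return
def solveInnerA (num : Int) (amount : Int) (a : Int) : List Int → Option (List Int)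
  | [] => none
  | b :: bs =>
    let c := num - (a + b)
    let total := a * 10000 + b * 5000 + c * 1000
    if total = amount then some [a, b, c] else solveInnerA num amount a bs

-- outer 'for count_10000 in range(...)' loop with early return
def solveOuterA (num : Int) (amount : Int) : List Int → Option (List Int)
  | [] => none
  | a :: as =>
    match solveInnerA num amount a (PySem.List.pyRange 0 (num - a + 1) 1) with
    | some r => some r
    | none => solveOuterA num amount as

def solve (num : Int) (amount : Int) : List Int :=
  (solveOuterA num amount (PySem.List.pyRange 0 (num + 1) 1)).getD [-1, -1, -1]

-- ===== PORT B =====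
-- single loop over count_10000; count_5000 comes from divmod of the linear equation
def solveLoopB (num : Int) (amount : Int) : List Int → Option (List Int)
  | [] => none
  | a :: as =>
    let rem := amount - 1000 * num - 9000 * a
    let q := PySem.Int.floordiv rem 4000
    let r := PySem.Int.mod rem 4000
    if r = 0 ∧ 0 ≤ q ∧ q ≤ num - a then some [a, q, num - a - q]
    else solveLoopB num amount as

def solve_alt (num : Int) (amount : Int) : List Int :=
  (solveLoopB num amount (PySem.List.pyRange 0 (num + 1) 1)).getD [-1, -1, -1]

-- ===== PRECONDITION & SPEC =====
def Spec_solve (num : Int) (amount : Int) (out : List Int) : Prop := out = solve_alt num amount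
instance (num : Int) (amount : Int) (out : List Int) : Decidable (Spec_solve num amount out) := by unfold Spec_solve; infer_instance

-- ===== CLAIM (what is proved, stated in full; the proofs are below) =====
def Claim_equal_solve : Prop := ∀ (num : Int) (amount : Int), Dom_solve num amount → Spec_solve num amount (solve num amount)

-- ===== LEMMAS AND PROOFS =====

-- A's inner scan over any list of candidate b's finds exactly the (unique) b with 4000*b = rem.
lemma innerA_char (num amount a : Int) (bs : List Int) :
    solveInnerA num amount a bs =
      (if (4000:Int) ∣ (amount - 1000 * num - 9000 * a) ∧
          (amount - 1000 * num - 9000 * a) / 4000 ∈ bs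
       then some [a, (amount - 1000 * num - 9000 * a) / 4000,
                  num - (a + (amount - 1000 * num - 9000 * a) / 4000)]
       else none) := by
  set rem := amount - 1000 * num - 9000 * a with hrem
  induction bs with
  | nil => simp [solveInnerA]
  | cons b bs ih =>
    rw [solveInnerA]
    by_cases hc : a * 10000 + b * 5000 + (num - (a + b)) * 1000 = amount
    · have hb : 4000 * b = rem := by omega
      have hdvd : (4000:Int) ∣ rem := ⟨b, hb.symm⟩
      have hq : rem / 4000 = b := by
        rw [← hb]; exact Int.mul_ediv_cancel_left b (by norm_num)
      simp only [hc, if_pos]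
      simp [hq, hdvd]
    · have hb : 4000 * b ≠ rem := by intro h; exact hc (by omega)
      simp only [if_neg hc]
      rw [ih]
      by_cases hdvd : (4000:Int) ∣ rem
      · have hne : rem / 4000 ≠ b := by
          intro h
          apply hb
          obtain ⟨k, hk⟩ := hdvd
          rw [hk] at h ⊢
          rw [Int.mul_ediv_cancel_left k (by norm_num)] at h
          rw [h]
        simp [hdvd, List.mem_cons, hne]
      · simp [hdvd]

-- On the range A actually scans, A's inner loop equals B's closed-form test for this a.
lemma inner_eq_B (num amount a : Int) :
    solveInnerA num amount a (PySem.List.pyRange 0 (num - a + 1) 1) =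
      (let rem := amount - 1000 * num - 9000 * a
       let q := PySem.Int.floordiv rem 4000
       let r := PySem.Int.mod rem 4000
       if r = 0 ∧ 0 ≤ q ∧ q ≤ num - a then some [a, q, num - a - q] else none) := by
  rw [innerA_char]
  set rem := amount - 1000 * num - 9000 * a with hrem
  by_cases hdvd : (4000:Int) ∣ rem
  · have hmod : PySem.Int.mod rem 4000 = 0 := (PySem.Int.mod_eq_zero_iff_dvd rem 4000).mpr hdvd
    have hfd : PySem.Int.floordiv rem 4000 = rem / 4000 := by
      simp [PySem.Int.floordiv, Int.fdiv_eq_ediv_of_dvd hdvd]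
    simp only [hmod, hfd]
    by_cases hr : 0 ≤ rem / 4000 ∧ rem / 4000 ≤ num - a
    · have hmem : rem / 4000 ∈ PySem.List.pyRange 0 (num - a + 1) 1 :=
        (PySem.List.mem_pyRange_one).mpr ⟨hr.1, by omega⟩
      rw [if_pos ⟨hdvd, hmem⟩, if_pos ⟨by trivial, hr⟩]
      have h3 : num - (a + rem / 4000) = num - a - rem / 4000 := by omega
      rw [h3]
    · have hA : ¬ ((4000:Int) ∣ rem ∧ rem / 4000 ∈ PySem.List.pyRange 0 (num - a + 1) 1) := by
        rintro ⟨-, hmem⟩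
        rw [PySem.List.mem_pyRange_one] at hmem
        exact hr ⟨hmem.1, by omega⟩
      rw [if_neg hA, if_neg (by rintro ⟨-, h1, h2⟩; exact hr ⟨h1, h2⟩)]
  · have hmod : PySem.Int.mod rem 4000 ≠ 0 := by
      intro h; exact hdvd ((PySem.Int.mod_eq_zero_iff_dvd rem 4000).mp h)
    rw [if_neg (by rintro ⟨h, -⟩; exact hdvd h),
        if_neg (by rintro ⟨h, -⟩; exact hmod h)]

-- The two outer loops agree on every candidate list.
lemma outer_eq (num amount : Int) (as : List Int) :
    solveOuterA num amount as = solveLoopB num amount as := by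
  induction as with
  | nil => rfl
  | cons a as ih =>
    rw [solveOuterA, solveLoopB, inner_eq_B]
    simp only []
    by_cases h : PySem.Int.mod (amount - 1000 * num - 9000 * a) 4000 = 0 ∧
        0 ≤ PySem.Int.floordiv (amount - 1000 * num - 9000 * a) 4000 ∧
        PySem.Int.floordiv (amount - 1000 * num - 9000 * a) 4000 ≤ num - a
    · rw [if_pos h, if_pos h]
    · rw [if_neg h, if_neg h]
      exact ih

-- ===== VERDICT (by name: the statement is the Claim_ definition above) =====
theorem solve_spec : Claim_equal_solve := by
  intro num amount _
  unfold Spec_solve solve solve_alt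
  rw [outer_eq]
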